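-- pv_equiv track=rewrite | github.com/rahulkataria35/DSA-Python-Essentials | 5.String/14.sumBeauty.py | sumWithB
-- ===== SOURCE A (Python) =====
-- def sumWithB(s):
--     ans = 0
--     for i in range (len(s)):
--         freq = [0] * 26
--
--         for j in range (i,len(s)):
--             freq[ord(s[j])  - 97] += 1
--             ans += max(freq) - min(x for x in freq if x != 0)
--     return ans
-- ===== SOURCE B (Python) =====
-- def sumWithB(s):
--     n = len(s)
--     # prefix table: P[k][c] = occurrences mapped to bucket c among the first k characters
--     P = [[0] * 26]
--     for ch in s:
--         row = P[-1][:]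
--         row[ord(ch) - 97] += 1
--         P.append(row)
--     ans = 0
--     for i in range(n):
--         for j in range(i, n):
--             freq = [P[j + 1][c] - P[i][c] for c in range(26)]
--             ans += max(freq) - min(x for x in freq if x != 0)
--     return ans
-- ===== Notes on version B (the rewrite author's own statement) =====
-- stated objective: alternative
-- what changed: A maintains, for each start index, a running 26-slot frequency vector extended one character at a time; B instead precomputes a prefix-count table P (P[k][c] = occurrences of bucket c in s[:k]) once and reconstructs every substring's frequency vector by entry-wise subtraction P[j+1][c]-P[i][c].
import Mathlib
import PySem

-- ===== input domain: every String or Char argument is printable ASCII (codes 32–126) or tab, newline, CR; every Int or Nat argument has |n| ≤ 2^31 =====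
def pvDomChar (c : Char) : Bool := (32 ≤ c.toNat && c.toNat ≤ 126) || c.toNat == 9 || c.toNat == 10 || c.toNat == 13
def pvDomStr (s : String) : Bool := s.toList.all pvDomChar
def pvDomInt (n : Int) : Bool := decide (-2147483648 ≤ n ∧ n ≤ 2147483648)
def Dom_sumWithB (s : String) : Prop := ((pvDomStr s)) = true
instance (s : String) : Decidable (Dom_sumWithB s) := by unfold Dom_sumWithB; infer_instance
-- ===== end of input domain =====

-- B replaces A's per-start running frequency vector by a prefix-count table built once, reconstructing
-- each substring's 26-vector by subtraction (objective: alternative decomposition, same asymptotic cost).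

-- Python `xs[i] += 1` on a 26-slot list: exact Python index semantics (negative index counts from the
-- end) whenever the normalized index is in range — Pre_ guarantees that; Python raises IndexError otherwise.
def pyIncAt (xs : List Int) (i : Int) : List Int :=
  let j : Int := if i < 0 then i + xs.length else i
  xs.set j.toNat (xs.getD j.toNat 0 + 1)

-- `max(freq) - min(x for x in freq if x != 0)` — the identical expression in both Python sources;
-- the .getD 0 defaults are never taken: freq has 26 entries, at least one of them nonzero.
def beauty (freq : List Int) : Int :=
  (PySem.List.max? freq id).getD 0
    - (PySem.List.min? (freq.filter (fun x => x ≠ 0)) id).getD 0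

-- ===== PORT A =====
def sumWithB (s : String) : Int :=
  let cs := s.toList
  let n : Int := (cs.length : Int)
  (PySem.List.pyRange 0 n).foldl (fun ans i =>
    ((PySem.List.pyRange i n).foldl (fun (st : List Int × Int) j =>
        -- s[j] is always in range here (i ≤ j < len(s)), so the .getD ' ' default is never taken
        let freq := pyIncAt st.1 ((((PySem.List.pyGet? cs j).getD ' ').toNat : Int) - 97)
        (freq, st.2 + beauty freq))
      (List.replicate 26 0, ans)).2) 0

-- ===== PORT B =====
def sumWithB_alt (s : String) : Int :=
  let cs := s.toList
  let n : Int := (cs.length : Int)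
  -- P[k][c] = occurrences in bucket c among the first k characters; P[-1][:] copied then bumped
  let P : List (List Int) := cs.foldl
    (fun P ch => P ++ [pyIncAt ((PySem.List.pyGet? P (-1)).getD []) ((ch.toNat : Int) - 97)])
    [List.replicate 26 0]
  (PySem.List.pyRange 0 n).foldl (fun ans i =>
    (PySem.List.pyRange i n).foldl (fun ans j =>
      -- all table indices are in range here, so the pyGetD defaults are never taken
      let freq := (PySem.List.pyRange 0 26).map (fun c =>
        PySem.List.pyGetD (PySem.List.pyGetD P (j + 1) []) c 0
          - PySem.List.pyGetD (PySem.List.pyGetD P i []) c 0)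
      ans + beauty freq) ans) 0

-- ===== PRECONDITION & SPEC =====
-- Pre_ admits exactly the strings on which Python A returns: freq[ord(c)-97] must be a valid
-- (possibly negative, then wrapping) index into the 26-slot list, i.e. 71 ≤ ord(c) ≤ 122 for every
-- character; on every other string BOTH Pythons raise IndexError on the same character.
def Pre_sumWithB (s : String) : Prop :=
  (s.toList.all (fun c => 71 ≤ c.toNat && c.toNat ≤ 122)) = true
instance (s : String) : Decidable (Pre_sumWithB s) := by unfold Pre_sumWithB; infer_instance
def pvWitness_sumWithB : String := "abz"

def Spec_sumWithB (s : String) (out : Int) : Prop := out = sumWithB_alt s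
instance (s : String) (out : Int) : Decidable (Spec_sumWithB s out) := by unfold Spec_sumWithB; infer_instance

-- ===== CLAIM (what is proved, stated in full; the proofs are below) =====
def Claim_equal_sumWithB : Prop := ∀ (s : String), Dom_sumWithB s → Pre_sumWithB s → Spec_sumWithB s (sumWithB s)

-- ===== LEMMAS AND PROOFS =====

def Z26 : List Int := List.replicate 26 0

def idxOf (c : Char) : Int := (c.toNat : Int) - 97

def freqFrom (f : List Int) (cs : List Char) : List Int :=
  cs.foldl (fun g c => pyIncAt g (idxOf c)) f

-- running beauty sum of A's inner loop, over the remaining characters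
def bsum (f : List Int) : List Char → Int
  | [] => 0
  | c :: r => beauty (pyIncAt f (idxOf c)) + bsum (pyIncAt f (idxOf c)) r

-- the rows appended by B's table-building loop
def rowsB (f : List Int) : List Char → List (List Int)
  | [] => []
  | c :: r => pyIncAt f (idxOf c) :: rowsB (pyIncAt f (idxOf c)) r

lemma pyGet?_neg_one {α : Type} (xs : List α) (h : xs ≠ []) :
    PySem.List.pyGet? xs (-1) = some (xs.getLast h) := by
  have hl : 0 < xs.length := List.length_pos_iff.mpr h
  have h1 : (-(xs.length:Int) ≤ (-1:Int)) := by omega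
  simp only [PySem.List.pyGet?, PySem.List.pyIdx?]
  rw [if_neg (by omega), if_pos h1]
  simp only [Option.bind_some]
  rw [List.getLast_eq_getElem, List.getElem?_eq_getElem (by norm_num; omega)]
  norm_num

lemma length_pyIncAt (xs : List Int) (i : Int) : (pyIncAt xs i).length = xs.length := by
  simp [pyIncAt]

lemma length_freqFrom (f : List Int) (cs : List Char) : (freqFrom f cs).length = f.length := by
  induction cs generalizing f with
  | nil => rfl
  | cons c r ih => simp [freqFrom, List.foldl_cons] at *; rw [ih]; exact length_pyIncAt f (idxOf c)

lemma freqFrom_append (f : List Int) (xs ys : List Char) :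
    freqFrom f (xs ++ ys) = freqFrom (freqFrom f xs) ys := by
  simp [freqFrom, List.foldl_append]

-- the wrapped bucket of an admissible character
def bucket (c : Char) : Nat := (if idxOf c < 0 then idxOf c + 26 else idxOf c).toNat

lemma bucket_lt (c : Char) (hc : 71 ≤ c.toNat ∧ c.toNat ≤ 122) : bucket c < 26 := by
  obtain ⟨h1, h2⟩ := hc
  simp only [bucket, idxOf]
  split_ifs <;> omega

lemma Z26_getD (t : Nat) (ht : t < 26) : Z26.getD t 0 = 0 := by
  rw [List.getD_eq_getElem Z26 0 (by simp [Z26]; omega)]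
  exact List.getElem_replicate _

lemma pyIncAt_entry (f : List Int) (c : Char) (hc : 71 ≤ c.toNat ∧ c.toNat ≤ 122)
    (hf : f.length = 26) (t : Nat) (ht : t < 26) :
    (pyIncAt f (idxOf c)).getD t 0 = f.getD t 0 + (if t = bucket c then 1 else 0) := by
  have hb := bucket_lt c hc
  obtain ⟨hc1, hc2⟩ := hc
  have hidx : (if idxOf c < 0 then idxOf c + ((f.length : Nat) : Int) else idxOf c).toNat
      = bucket c := by
    rw [hf]
    simp only [bucket, idxOf]
    split_ifs <;> norm_num
  simp only [pyIncAt, hidx]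
  by_cases h : t = bucket c
  · subst h
    rw [List.getD_eq_getElem _ _ (by simp [hf]; omega), List.getElem_set, if_pos rfl, if_pos rfl]
  · rw [List.getD_eq_getElem _ _ (by simp [hf]; omega), List.getElem_set,
        if_neg (fun hh => h hh.symm), if_neg h]
    simp [List.getElem?_eq_getElem (show t < f.length by omega)]

lemma freqFrom_entry_add (cs : List Char) (f : List Int)
    (hcs : ∀ c ∈ cs, 71 ≤ c.toNat ∧ c.toNat ≤ 122) (hf : f.length = 26)
    (t : Nat) (ht : t < 26) :
    (freqFrom f cs).getD t 0 = f.getD t 0 + (freqFrom Z26 cs).getD t 0 := by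
  induction cs generalizing f with
  | nil =>
    simp only [freqFrom, List.foldl_nil]
    rw [Z26_getD t ht]
    ring
  | cons c r ih =>
    have hc := hcs c (by simp)
    have hr : ∀ x ∈ r, 71 ≤ x.toNat ∧ x.toNat ≤ 122 := fun x hx => hcs x (by simp [hx])
    have hZ : (Z26 : List Int).length = 26 := by simp [Z26]
    have h1 : freqFrom f (c :: r) = freqFrom (pyIncAt f (idxOf c)) r := rfl
    have h2 : freqFrom Z26 (c :: r) = freqFrom (pyIncAt Z26 (idxOf c)) r := rfl
    rw [h1, h2, ih (pyIncAt f (idxOf c)) hr (by rw [length_pyIncAt, hf]),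
        ih (pyIncAt Z26 (idxOf c)) hr (by rw [length_pyIncAt, hZ]),
        pyIncAt_entry f c hc hf t ht, pyIncAt_entry Z26 c hc hZ t ht, Z26_getD t ht]
    ring

-- a 26-long list is the range-26 map of its entries
lemma map_range_getD (g : List Int) (hg : g.length = 26) :
    (List.range 26).map (fun t => g.getD t 0) = g := by
  apply List.ext_getElem
  · simp [hg]
  · intro k h1 h2
    simp only [List.getElem_map, List.getElem_range]
    rw [List.getD_eq_getElem _ _ (by omega)]

-- ===== the A side: inner loop = bsum over the remaining suffix =====
lemma innerA (cs : List Char) (rest : List Char) (k : Nat) (f : List Int) (a : Int)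
    (hk : cs.drop k = rest) :
    ((PySem.List.pyRange (k : Int) (cs.length : Int)).foldl
      (fun (st : List Int × Int) j =>
        let freq := pyIncAt st.1 ((((PySem.List.pyGet? cs j).getD ' ').toNat : Int) - 97)
        (freq, st.2 + beauty freq)) (f, a)).2 = a + bsum f rest := by
  induction rest generalizing k f a with
  | nil =>
    have hlen : cs.length ≤ k := by
      by_contra h
      have : cs.drop k ≠ [] := by
        apply List.ne_nil_of_length_pos
        simp [List.length_drop]; omega
      exact this hk
    have : PySem.List.pyRange (k : Int) (cs.length : Int) = [] := by
      simp [PySem.List.pyRange]; omega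
    rw [this]; simp [bsum]
  | cons c r ih =>
    have hklt : k < cs.length := by
      by_contra h
      rw [List.drop_eq_nil_of_le (by omega)] at hk
      exact List.cons_ne_nil c r hk.symm
    have hget : cs[k]? = some c := by
      have := @List.getElem?_drop _ cs k 0
      rw [hk] at this
      simpa using this.symm
    have hdk : cs.drop (k + 1) = r := by
      have h1 := congrArg (List.drop 1) hk
      simpa [List.drop_drop, Nat.add_comm] using h1
    have hcast : ((k : Int) + 1) = ((k + 1 : Nat) : Int) := by push_cast; ring
    rw [PySem.List.pyRange_one_cons (by exact_mod_cast hklt), List.foldl_cons]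
    simp only [PySem.List.pyGet?_natCast, hget, Option.getD_some]
    rw [hcast, ih (k + 1) _ _ hdk]
    simp only [bsum, idxOf]
    ring

-- ===== the B side: the table is the rows of running prefix counts =====
lemma foldlP (cs : List Char) (acc : List (List Int)) (h : acc ≠ []) :
    cs.foldl (fun P ch => P ++ [pyIncAt ((PySem.List.pyGet? P (-1)).getD []) ((ch.toNat : Int) - 97)]) acc
      = acc ++ rowsB (acc.getLast h) cs := by
  induction cs generalizing acc with
  | nil => simp [rowsB]
  | cons c r ih =>
    rw [List.foldl_cons, pyGet?_neg_one acc h]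
    simp only [Option.getD_some]
    have hne : acc ++ [pyIncAt (acc.getLast h) ((c.toNat : Int) - 97)] ≠ [] := by simp
    rw [ih _ hne]
    have hlast : (acc ++ [pyIncAt (acc.getLast h) ((c.toNat : Int) - 97)]).getLast hne
        = pyIncAt (acc.getLast h) ((c.toNat : Int) - 97) := by
      simp
    rw [hlast]
    simp only [List.append_assoc, List.singleton_append, rowsB, idxOf]

lemma rowsB_getElem? (cs : List Char) (f : List Int) (k : Nat) (hk : k < cs.length) :
    (rowsB f cs)[k]? = some (freqFrom f (cs.take (k + 1))) := by
  induction cs generalizing f k with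
  | nil => simp at hk
  | cons c r ih =>
    cases k with
    | zero => simp [rowsB, freqFrom]
    | succ m =>
      have hm : m < r.length := by simpa using hk
      simp only [rowsB, List.getElem?_cons_succ, List.take_succ_cons]
      rw [ih _ m hm]
      rfl

-- the full table lookup: P[k] = freqFrom Z26 (cs.take k) for k ≤ len
lemma table_getD (cs : List Char) (k : Nat) (hk : k ≤ cs.length) :
    PySem.List.pyGetD ((List.replicate 26 (0:Int)) :: rowsB Z26 cs) (k : Int) []
      = freqFrom Z26 (cs.take k) := by
  rw [PySem.List.pyGetD_natCast, List.getD_eq_getElem?_getD]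
  cases k with
  | zero => simp [freqFrom, Z26]
  | succ m =>
    simp only [List.getElem?_cons_succ]
    rw [rowsB_getElem? cs Z26 m (by omega)]
    rfl

-- the middle-window frequency entry, by subtraction of prefix counts
lemma middle_entry (cs : List Char) (hcs : ∀ c ∈ cs, 71 ≤ c.toNat ∧ c.toNat ≤ 122)
    (i k : Nat) (hik : i ≤ k) (t : Nat) (ht : t < 26) :
    (freqFrom Z26 (cs.take k)).getD t 0 - (freqFrom Z26 (cs.take i)).getD t 0
      = (freqFrom Z26 ((cs.drop i).take (k - i))).getD t 0 := by
  have hsplit : cs.take k = cs.take i ++ (cs.drop i).take (k - i) := by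
    rw [← List.take_add]
    congr 1
    omega
  have hmid : ∀ c ∈ (cs.drop i).take (k - i), 71 ≤ c.toNat ∧ c.toNat ≤ 122 :=
    fun c hc => hcs c (List.mem_of_mem_drop (List.mem_of_mem_take hc))
  rw [hsplit, freqFrom_append,
      freqFrom_entry_add ((cs.drop i).take (k - i)) (freqFrom Z26 (cs.take i)) hmid
        (by rw [length_freqFrom]; simp [Z26]) t ht]
  ring

-- the window vector B computes from the table equals the running vector A maintains
lemma window_eq (cs : List Char) (hcs : ∀ c ∈ cs, 71 ≤ c.toNat ∧ c.toNat ≤ 122)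
    (i k : Nat) (hik : i ≤ k) :
    (PySem.List.pyRange 0 26).map (fun t =>
        PySem.List.pyGetD (freqFrom Z26 (cs.take k)) t 0
          - PySem.List.pyGetD (freqFrom Z26 (cs.take i)) t 0)
      = freqFrom Z26 ((cs.drop i).take (k - i)) := by
  have h26 : (26 : Int) = ((26 : Nat) : Int) := by norm_num
  rw [h26, PySem.List.pyRange_zero_natCast, List.map_map]
  have hlen : (freqFrom Z26 ((cs.drop i).take (k - i))).length = 26 := by
    rw [length_freqFrom]; simp [Z26]
  rw [← map_range_getD (freqFrom Z26 ((cs.drop i).take (k - i))) hlen]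
  apply List.map_congr_left
  intro t hmem
  have ht : t < 26 := List.mem_range.mp hmem
  simp only [Function.comp_apply, PySem.List.pyGetD_natCast]
  rw [List.getD_eq_getElem?_getD, List.getD_eq_getElem?_getD, List.getD_eq_getElem?_getD]
  rw [← List.getD_eq_getElem?_getD, ← List.getD_eq_getElem?_getD, ← List.getD_eq_getElem?_getD]
  exact middle_entry cs hcs i k hik t ht

-- B's inner loop over the table = bsum over the remaining suffix
lemma innerB (cs : List Char) (hcs : ∀ c ∈ cs, 71 ≤ c.toNat ∧ c.toNat ≤ 122)
    (P : List (List Int))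
    (hP : ∀ m : Nat, m ≤ cs.length → PySem.List.pyGetD P (m : Int) [] = freqFrom Z26 (cs.take m))
    (i : Nat) (rest : List Char) (k : Nat) (hik : i ≤ k) (hk : cs.drop k = rest) (a : Int) :
    (PySem.List.pyRange (k : Int) (cs.length : Int)).foldl (fun ans j =>
        let freq := (PySem.List.pyRange 0 26).map (fun c =>
          PySem.List.pyGetD (PySem.List.pyGetD P (j + 1) []) c 0
            - PySem.List.pyGetD (PySem.List.pyGetD P (i : Int) []) c 0)
        ans + beauty freq) a
      = a + bsum (freqFrom Z26 ((cs.drop i).take (k - i))) rest := by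
  induction rest generalizing k a with
  | nil =>
    have hlen : cs.length ≤ k := by
      by_contra h
      have : cs.drop k ≠ [] := by
        apply List.ne_nil_of_length_pos
        simp [List.length_drop]; omega
      exact this hk
    have : PySem.List.pyRange (k : Int) (cs.length : Int) = [] := by
      simp [PySem.List.pyRange]; omega
    rw [this]; simp [bsum]
  | cons c r ih =>
    have hklt : k < cs.length := by
      by_contra h
      rw [List.drop_eq_nil_of_le (by omega)] at hk
      exact List.cons_ne_nil c r hk.symm
    have hget : cs[k]? = some c := by
      have := @List.getElem?_drop _ cs k 0
      rw [hk] at this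
      simpa using this.symm
    have hdk : cs.drop (k + 1) = r := by
      have h1 := congrArg (List.drop 1) hk
      simpa [List.drop_drop, Nat.add_comm] using h1
    have hcast : ((k : Int) + 1) = ((k + 1 : Nat) : Int) := by push_cast; ring
    have hstep : (cs.drop i).take (k + 1 - i) = (cs.drop i).take (k - i) ++ [c] := by
      have h1 : k + 1 - i = (k - i) + 1 := by omega
      rw [h1, List.take_add_one]
      congr 1
      rw [@List.getElem?_drop _ cs i (k - i)]
      have h2 : i + (k - i) = k := by omega
      rw [h2, hget]
      rfl
    have hbump : freqFrom Z26 ((cs.drop i).take (k + 1 - i))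
        = pyIncAt (freqFrom Z26 ((cs.drop i).take (k - i))) (idxOf c) := by
      rw [hstep, freqFrom_append]
      rfl
    have hhead : (let freq := (PySem.List.pyRange 0 26).map (fun c =>
          PySem.List.pyGetD (PySem.List.pyGetD P ((k : Int) + 1) []) c 0
            - PySem.List.pyGetD (PySem.List.pyGetD P (i : Int) []) c 0)
        a + beauty freq)
        = a + beauty (pyIncAt (freqFrom Z26 ((cs.drop i).take (k - i))) (idxOf c)) := by
      simp only [hcast, hP (k + 1) (by omega), hP i (by omega)]
      rw [window_eq cs hcs i (k + 1) (by omega), hbump]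
    rw [PySem.List.pyRange_one_cons (a := (k : Int)) (b := (cs.length : Int))
          (by exact_mod_cast hklt), List.foldl_cons, hhead, hcast, ih (k + 1) (by omega) hdk,
        hbump]
    simp only [bsum]
    ring

-- the table built by B's first loop
lemma P_built (cs : List Char) :
    cs.foldl (fun P ch => P ++ [pyIncAt ((PySem.List.pyGet? P (-1)).getD []) ((ch.toNat : Int) - 97)])
      [List.replicate 26 0]
      = (List.replicate 26 (0:Int)) :: rowsB Z26 cs := by
  rw [foldlP cs [List.replicate 26 0] (by simp)]
  rfl

-- ===== VERDICT (by name: the statement is the Claim_ definition above) =====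
theorem sumWithB_spec : Claim_equal_sumWithB := by
  intro s _ hpre
  unfold Spec_sumWithB sumWithB sumWithB_alt
  simp only []
  set cs := s.toList with hcs_def
  have hcs : ∀ c ∈ cs, 71 ≤ c.toNat ∧ c.toNat ≤ 122 := by
    intro c hc
    have h := List.all_eq_true.mp hpre c hc
    simp only [Bool.and_eq_true, decide_eq_true_eq] at h
    exact h
  rw [P_built cs]
  have hP : ∀ m : Nat, m ≤ cs.length →
      PySem.List.pyGetD ((List.replicate 26 (0:Int)) :: rowsB Z26 cs) (m : Int) []
        = freqFrom Z26 (cs.take m) := fun m hm => table_getD cs m hm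
  rw [PySem.List.pyRange_zero_natCast cs.length, List.foldl_map, List.foldl_map]
  apply PySem.List.foldl_congr_mem
  intro a i hi
  have hilt : i < cs.length := List.mem_range.mp hi
  have hA := innerA cs (cs.drop i) i (List.replicate 26 0) a rfl
  have hB := innerB cs hcs _ hP i (cs.drop i) i (le_refl i) rfl a
  rw [hA]
  rw [hB]
  have : (cs.drop i).take (i - i) = [] := by simp
  rw [this]
  rfl
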